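-- pv_equiv track=rewrite | github.com/characterma/NER_BERT_TRAIN | src/sentence_include_entity_eval.py | filter_substring
-- ===== SOURCE A (Python) =====
-- def filter_substring(labels):
--     labels_ = []
--     for i in labels:
--         i = str(i)
--         temp = labels.copy()
--         temp.remove(i)
--         flag = 1
--         for j in temp:
--             j = str(j)
--             if i not in j:
--                 continue
--             else:
--                 flag = 0
--                 break
--         if flag:
--             labels_.append(i)
--     return labels_
-- ===== SOURCE B (Python) =====
-- def filter_substring(labels):
--     # Stage 1: frequency table of the labels.
--     cnt = {}
--     for x in labels:
--         cnt[x] = cnt.get(x, 0) + 1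
--     # Stage 2: global "bad" set = duplicated labels, plus every distinct label
--     # that is a substring of some OTHER distinct label.
--     bad = set(x for x, c in cnt.items() if c > 1)
--     for j in cnt:
--         for i in cnt:
--             if i != j and i in j:
--                 bad.add(i)
--     # Stage 3: keep the labels not in the bad set.
--     return [x for x in labels if x not in bad]
-- ===== Notes on version B (the rewrite author's own statement) =====
-- stated objective: alternative
-- what changed: Replaced A's per-element scan (copy the list, remove self, break on first container) by three staged passes: build a frequency dict once, compute a global bad-set (duplicated labels plus distinct labels contained in another distinct label) over the distinct labels only, then filter by set membership; duplicate labels are scanned once instead of once per occurrence.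
import Mathlib
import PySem

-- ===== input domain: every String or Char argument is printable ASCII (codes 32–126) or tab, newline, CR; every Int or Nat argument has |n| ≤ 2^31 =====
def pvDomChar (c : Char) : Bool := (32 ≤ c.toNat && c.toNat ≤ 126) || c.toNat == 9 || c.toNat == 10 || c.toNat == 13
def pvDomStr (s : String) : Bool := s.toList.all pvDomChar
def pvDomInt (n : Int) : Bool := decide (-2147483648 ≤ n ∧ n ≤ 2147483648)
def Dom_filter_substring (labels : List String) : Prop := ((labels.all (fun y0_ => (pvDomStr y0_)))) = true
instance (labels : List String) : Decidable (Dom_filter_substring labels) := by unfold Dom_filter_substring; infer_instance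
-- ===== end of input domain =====

-- B replaces A's per-element copy/remove/break scan by three staged passes:
-- a frequency dict, a global bad-set over the distinct labels, and a membership filter.

-- ===== PORT A =====
-- inner 'for j in temp' loop: continue on 'i not in j', else flag := 0 and break
def pvInnerFlag (i : String) : List String → Int
  | [] => 1
  | j :: rest => if PySem.Str.isIn i j = false then pvInnerFlag i rest else 0

def filter_substring (labels : List String) : List String :=
  labels.foldl (fun labels_ i =>
    match PySem.List.remove? labels i with
    | none => labels_            -- unreachable: i is drawn from labels
    | some temp => if pvInnerFlag i temp ≠ 0 then labels_ ++ [i] else labels_) []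

-- ===== PORT B =====
def filter_substring_alt (labels : List String) : List String :=
  -- cnt[x] = cnt.get(x, 0) + 1 loop
  let cnt : PySem.Dict String Int :=
    labels.foldl (fun d x => d.insert x (d.getD x 0 + 1)) PySem.Dict.empty
  -- bad = set(x for x, c in cnt.items() if c > 1)
  let bad0 : PySem.Set String :=
    PySem.Set.ofList (((cnt.items).filter (fun p => 1 < p.2)).map (·.1))
  -- for j in cnt: for i in cnt: if i != j and i in j: bad.add(i)
  let bad : PySem.Set String :=
    cnt.keys.foldl (fun b j =>
      cnt.keys.foldl (fun b i =>
        if i ≠ j ∧ PySem.Str.isIn i j then PySem.Set.add b i else b) b) bad0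
  labels.filter (fun x => !(PySem.Set.contains bad x))

-- ===== PRECONDITION & SPEC =====
def Spec_filter_substring (labels : List String) (out : List String) : Prop := out = filter_substring_alt labels
instance (labels : List String) (out : List String) : Decidable (Spec_filter_substring labels out) := by unfold Spec_filter_substring; infer_instance

-- ===== CLAIM (what is proved, stated in full; the proofs are below) =====
def Claim_equal_filter_substring : Prop := ∀ (labels : List String), Dom_filter_substring labels → Spec_filter_substring labels (filter_substring labels)

-- ===== LEMMAS AND PROOFS =====

-- A's inner loop returns 0 iff some remaining label contains i
theorem pvInnerFlag_eq (i : String) (l : List String) :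
    pvInnerFlag i l = if l.any (fun j => PySem.Str.isIn i j) then 0 else 1 := by
  induction l with
  | nil => rfl
  | cons j rest ih =>
    show (if PySem.Str.isIn i j = false then pvInnerFlag i rest else 0) = _
    rw [List.any_cons]
    cases h : PySem.Str.isIn i j
    · simpa [h] using ih
    · simp

-- membership in a conditional-add fold over a Set
theorem pv_mem_foldl_add_if {P : String → String → Prop} [∀ i j, Decidable (P i j)]
    (l : List String) (b : PySem.Set String) (j : String) (y : String) :
    (y ∈ l.foldl (fun b i => if P i j then PySem.Set.add b i else b) b)
      ↔ y ∈ b ∨ ∃ i ∈ l, P i j ∧ y = i := by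
  induction l generalizing b with
  | nil => simp
  | cons i rest ih =>
    simp only [List.foldl_cons, ih]
    split_ifs with h
    · rw [PySem.Set.mem_add]
      constructor
      · rintro (⟨h1 | h2⟩ | h3)
        · exact Or.inl h1
        · exact Or.inr ⟨i, by simp, h, h2⟩
        · obtain ⟨a, ha, hp, hy⟩ := h3; exact Or.inr ⟨a, List.mem_cons_of_mem _ ha, hp, hy⟩
      · rintro (h1 | ⟨a, ha, hp, hy⟩)
        · exact Or.inl (Or.inl h1)
        · rcases List.mem_cons.mp ha with rfl | ha'
          · exact Or.inl (Or.inr hy)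
          · exact Or.inr ⟨a, ha', hp, hy⟩
    · constructor
      · rintro (h1 | ⟨a, ha, hp, hy⟩)
        · exact Or.inl h1
        · exact Or.inr ⟨a, List.mem_cons_of_mem _ ha, hp, hy⟩
      · rintro (h1 | ⟨a, ha, hp, hy⟩)
        · exact Or.inl h1
        · rcases List.mem_cons.mp ha with rfl | ha'
          · exact absurd hp (by subst hy; exact h)
          · exact Or.inr ⟨a, ha', hp, hy⟩

-- membership in the nested bad-set fold
theorem pv_mem_nested (ks ks' : List String) (b0 : PySem.Set String) (y : String) :
    (y ∈ ks.foldl (fun b j =>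
        ks'.foldl (fun b i => if i ≠ j ∧ PySem.Str.isIn i j then PySem.Set.add b i else b) b) b0)
      ↔ y ∈ b0 ∨ ∃ j ∈ ks, ∃ i ∈ ks', (i ≠ j ∧ PySem.Str.isIn i j) ∧ y = i := by
  induction ks generalizing b0 with
  | nil => simp
  | cons j rest ih =>
    rw [List.foldl_cons, ih, pv_mem_foldl_add_if (P := fun i j => i ≠ j ∧ PySem.Str.isIn i j = true)]
    constructor
    · rintro (⟨h0 | ⟨i, hi, hp, hy⟩⟩ | ⟨a, ha, i, hi, hp, hy⟩)
      · exact Or.inl h0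
      · exact Or.inr ⟨j, by simp, i, hi, hp, hy⟩
      · exact Or.inr ⟨a, List.mem_cons_of_mem _ ha, i, hi, hp, hy⟩
    · rintro (h0 | ⟨a, ha, i, hi, hp, hy⟩)
      · exact Or.inl (Or.inl h0)
      · rcases List.mem_cons.mp ha with rfl | ha'
        · exact Or.inl (Or.inr ⟨i, hi, hp, hy⟩)
        · exact Or.inr ⟨a, ha', i, hi, hp, hy⟩

-- every string contains itself
theorem pv_isIn_self (x : String) : PySem.Str.isIn x x = true :=
  (PySem.Str.isIn_iff_infix x x).mpr (List.infix_refl _)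

-- A's "some other occurrence contains x" condition, restated over counts and distinct labels
theorem pv_cond_iff (labels : List String) (x : String) (hx : x ∈ labels) :
    ((labels.erase x).any (fun j => PySem.Str.isIn x j) = true)
      ↔ (1 < labels.count x ∨ ∃ j ∈ labels, (x ≠ j ∧ PySem.Str.isIn x j = true)) := by
  rw [List.any_eq_true]
  constructor
  · rintro ⟨j, hj, hin⟩
    by_cases hxy : j = x
    · subst hxy
      left
      have h1 : 1 ≤ (labels.erase j).count j := List.count_pos_iff.mpr hj
      have h2 : (labels.erase j).count j = labels.count j - 1 := List.count_erase_self ..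
      omega
    · exact Or.inr ⟨j, List.mem_of_mem_erase hj, fun h => hxy h.symm, by simpa using hin⟩
  · rintro (hc | ⟨j, hj, hne, hin⟩)
    · refine ⟨x, ?_, by simpa using pv_isIn_self x⟩
      have h2 : (labels.erase x).count x = labels.count x - 1 := List.count_erase_self ..
      exact List.count_pos_iff.mp (by omega)
    · exact ⟨j, (List.mem_erase_of_ne (fun h => hne h.symm)).mpr hj, by simpa using hin⟩

-- ===== VERDICT (by name: the statement is the Claim_ definition above) =====
theorem filter_substring_spec : Claim_equal_filter_substring := by
  intro labels _
  unfold Spec_filter_substring filter_substring filter_substring_alt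
  -- the frequency dict IS counter labels
  rw [PySem.Dict.foldl_insert_getD_add_one_eq_counter]
  -- rewrite A's fold into a filter
  rw [PySem.List.foldl_congr_mem labels _
      (fun labels_ i =>
        if (!((labels.erase i).any (fun j => PySem.Str.isIn i j))) = true
        then labels_ ++ [i] else labels_) []
      (by
        intro acc x hx
        rw [PySem.List.remove?_eq_some_erase labels x hx]
        show (if pvInnerFlag x (labels.erase x) ≠ 0 then acc ++ [x] else acc) = _
        rw [pvInnerFlag_eq]
        cases h : (labels.erase x).any (fun j => PySem.Str.isIn x j) <;> simp only [h] <;> norm_num)]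
  rw [PySem.List.foldl_append_if_eq_filter]
  rw [List.nil_append]
  apply List.filter_congr
  intro x hx
  -- both sides are negations; compare the underlying conditions
  rw [Bool.not_eq_eq_eq_not, Bool.not_not]
  rw [Bool.eq_iff_iff, PySem.Set.contains_iff, pv_mem_nested, pv_cond_iff labels x hx]
  rw [PySem.Dict.keys_counter, PySem.Dict.items_counter]
  constructor
  · rintro (hc | ⟨j, hj, hne, hin⟩)
    · left
      rw [PySem.Set.mem_ofList]
      refine List.mem_map.mpr ⟨(x, (labels.count x : Int)), ?_, rfl⟩
      refine List.mem_filter.mpr ⟨List.mem_map.mpr ⟨x, (PySem.Set.mem_ofList ..).mpr hx, rfl⟩, by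
        simp only [decide_eq_true_eq]; exact_mod_cast hc⟩
    · exact Or.inr ⟨j, (PySem.Set.mem_ofList ..).mpr hj, x, (PySem.Set.mem_ofList ..).mpr hx,
        ⟨hne, hin⟩, rfl⟩
  · rintro (h0 | ⟨j, hj, i, hi, ⟨hne, hin⟩, rfl⟩)
    · left
      rw [PySem.Set.mem_ofList] at h0
      obtain ⟨p, hp, hpx⟩ := List.mem_map.mp h0
      obtain ⟨hp1, hp2⟩ := List.mem_filter.mp hp
      obtain ⟨k, hk, rfl⟩ := List.mem_map.mp hp1
      subst hpx
      simp only [decide_eq_true_eq] at hp2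
      exact_mod_cast hp2
    · exact Or.inr ⟨j, (PySem.Set.mem_ofList ..).mp hj, hne, hin⟩
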